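-- pv_equiv track=rewrite | github.com/fabricehong/datamining_scripts | run.py | generate_all_sub_combination
-- ===== SOURCE A (Python) =====
-- def generate_all_sub_combination(the_list, min):
--     if len(the_list)<min:
--         return
--     yield the_list
--     for elem in the_list:
--         l = list(the_list)
--         l.remove(elem)
--         for x in generate_all_sub_combination(l, min):
--             yield x
-- ===== SOURCE B (Python) =====
-- def generate_all_sub_combination(the_list, min):
--     if len(the_list) < min:
--         return
--     stack = [the_list]
--     while stack:
--         node = stack.pop()
--         yield node
--         children = []
--         for elem in node:
--             c = list(node)
--             c.remove(elem)
--             if len(c) >= min: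
--                 children.append(c)
--         stack.extend(reversed(children))
-- ===== Notes on version B (the rewrite author's own statement) =====
-- stated objective: alternative
-- what changed: Replaces the recursive generator with an explicit stack-based iterative pre-order DFS that prunes children below the length bound before pushing them (in reverse) onto the stack.
import Mathlib
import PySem

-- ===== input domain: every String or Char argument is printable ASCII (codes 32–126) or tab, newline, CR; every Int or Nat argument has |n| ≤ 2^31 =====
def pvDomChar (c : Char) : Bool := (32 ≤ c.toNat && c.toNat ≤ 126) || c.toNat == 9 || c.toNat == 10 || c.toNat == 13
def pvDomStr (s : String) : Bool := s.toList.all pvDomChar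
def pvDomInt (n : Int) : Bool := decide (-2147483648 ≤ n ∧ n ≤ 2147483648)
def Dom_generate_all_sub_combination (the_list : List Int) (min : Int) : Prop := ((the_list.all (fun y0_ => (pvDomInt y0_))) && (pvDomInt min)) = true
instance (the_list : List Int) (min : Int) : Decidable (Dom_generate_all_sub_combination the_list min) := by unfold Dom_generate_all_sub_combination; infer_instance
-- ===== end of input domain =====

-- B replaces A's recursive generator by an explicit stack-based iterative pre-order DFS
-- (children pruned by the length bound and pushed in reverse); same output sequence, similar cost.
-- A/B are Python generators; the ports return the list of all yielded values in order.

-- ===== PORT A =====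
-- `l.remove(elem)` with elem ∈ l is remove-first-occurrence = List.erase (exact here, elem is
-- always a member so Python's remove never raises).
def generate_all_sub_combination (the_list : List Int) (min : Int) : List (List Int) :=
  if (the_list.length : Int) < min then []
  else
    the_list ::
      the_list.attach.flatMap
        (fun ⟨elem, he⟩ => generate_all_sub_combination (the_list.erase elem) min)
termination_by the_list.length
decreasing_by
  have h := List.length_erase_of_mem he
  have hpos : 0 < the_list.length := List.length_pos_of_mem he
  omega

-- ===== PORT B =====
-- the `children` list built by B's inner loop (copy, remove first occurrence, keep if long enough)
def pvChildren (node : List Int) (min : Int) : List (List Int) :=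
  (node.attach.map (fun ⟨elem, _⟩ => node.erase elem)).filter
    (fun c => decide (min ≤ (c.length : Int)))

-- B's while-loop over the explicit stack; head of `stack` is the top (pop = head,
-- `stack.extend(reversed(children))` = prepend the children in order); `acc` collects the yields.
def pvLoop (min : Int) (stack : List (List Int)) (acc : List (List Int)) : List (List Int) :=
  match stack with
  | [] => acc.reverse
  | node :: rest => pvLoop min (pvChildren node min ++ rest) (node :: acc)
termination_by (stack.map (fun l => (l.length + 1).factorial)).sum
decreasing_by
  simp only [List.map_append, List.sum_append, List.map_cons, List.sum_cons]
  have hmem : ∀ c ∈ pvChildren node min, (c.length + 1).factorial = node.length.factorial := by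
    intro c hc
    have hc' := List.mem_of_mem_filter hc
    obtain ⟨⟨e, he⟩, -, rfl⟩ := List.mem_map.mp hc'
    have h := List.length_erase_of_mem he
    have hpos : 0 < node.length := List.length_pos_of_mem he
    rw [h]
    congr 1
    omega
  have hlen : (pvChildren node min).length ≤ node.length := by
    calc (pvChildren node min).length
        ≤ (node.attach.map (fun x => node.erase x.1)).length := List.length_filter_le _ _
      _ = node.length := by simp
  have hsum : ((pvChildren node min).map (fun l => (l.length + 1).factorial)).sum
      ≤ node.length * node.length.factorial := by
    calc ((pvChildren node min).map (fun l => (l.length + 1).factorial)).sum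
        ≤ ((pvChildren node min).map (fun _ => node.length.factorial)).sum := by
          apply List.sum_le_sum
          intro c hc
          rw [hmem c hc]
      _ = (pvChildren node min).length * node.length.factorial := by
          simp [List.map_const', List.sum_replicate, smul_eq_mul]
      _ ≤ node.length * node.length.factorial := Nat.mul_le_mul_right _ hlen
  have hfac : node.length * node.length.factorial < (node.length + 1).factorial := by
    rw [Nat.factorial_succ]
    have : 0 < node.length.factorial := Nat.factorial_pos _
    nlinarith
  omega

def generate_all_sub_combination_alt (the_list : List Int) (min : Int) : List (List Int) :=
  if (the_list.length : Int) < min then []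
  else pvLoop min [the_list] []

-- ===== PRECONDITION & SPEC =====
def Spec_generate_all_sub_combination (the_list : List Int) (min : Int) (out : List (List Int)) : Prop := out = generate_all_sub_combination_alt the_list min
instance (the_list : List Int) (min : Int) (out : List (List Int)) : Decidable (Spec_generate_all_sub_combination the_list min out) := by unfold Spec_generate_all_sub_combination; infer_instance

-- ===== CLAIM (what is proved, stated in full; the proofs are below) =====
def Claim_equal_generate_all_sub_combination : Prop := ∀ (the_list : List Int) (min : Int), Dom_generate_all_sub_combination the_list min → Spec_generate_all_sub_combination the_list min (generate_all_sub_combination the_list min)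

-- ===== LEMMAS AND PROOFS =====

theorem flatMap_filter_of_nil {α β : Type} (g : α → List β) (p : α → Bool) (xs : List α)
    (h : ∀ c ∈ xs, p c = false → g c = []) :
    (xs.filter p).flatMap g = xs.flatMap g := by
  induction xs with
  | nil => rfl
  | cons x xs ih =>
    have ih' := ih (fun c hc => h c (List.mem_cons_of_mem _ hc))
    by_cases hx : p x = true
    · simp [hx, ih']
    · have hx' : p x = false := by simpa using hx
      simp [hx', h x (by simp) hx', ih']

theorem genA_eq (the_list : List Int) (min : Int) :
    generate_all_sub_combination the_list min =
      if (the_list.length : Int) < min then []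
      else the_list ::
        the_list.attach.flatMap
          (fun x => generate_all_sub_combination (the_list.erase x.1) min) := by
  rw [generate_all_sub_combination]

theorem children_flatMap (node : List Int) (min : Int) :
    (pvChildren node min).flatMap (fun n => generate_all_sub_combination n min) =
      node.attach.flatMap (fun x => generate_all_sub_combination (node.erase x.1) min) := by
  unfold pvChildren
  rw [flatMap_filter_of_nil]
  · simp [List.flatMap_map]
  · intro c _ hc
    rw [genA_eq]
    simp only [decide_eq_false_iff_not, not_le] at hc
    simp [hc]

theorem pvLoop_eq (min : Int) (stack acc : List (List Int))
    (h : ∀ n ∈ stack, ¬ ((n.length : Int) < min)) :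
    pvLoop min stack acc =
      acc.reverse ++ stack.flatMap (fun n => generate_all_sub_combination n min) := by
  fun_induction pvLoop min stack acc with
  | case1 acc => simp
  | case2 acc node rest ih =>
    have hnode := h node (by simp)
    have h' : ∀ n ∈ pvChildren node min ++ rest, ¬ ((n.length : Int) < min) := by
      intro n hn
      rcases List.mem_append.mp hn with hn | hn
      · have := List.of_mem_filter hn
        simp only [decide_eq_true_eq] at this
        omega
      · exact h n (List.mem_cons_of_mem _ hn)
    rw [ih h']
    simp only [List.reverse_cons, List.append_assoc, List.flatMap_append, List.flatMap_cons,
      List.singleton_append]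
    rw [genA_eq node min, if_neg hnode, children_flatMap]
    simp

-- ===== VERDICT (by name: the statement is the Claim_ definition above) =====
theorem generate_all_sub_combination_spec : Claim_equal_generate_all_sub_combination := by
  intro the_list min _
  unfold Spec_generate_all_sub_combination generate_all_sub_combination_alt
  by_cases h : (the_list.length : Int) < min
  · rw [genA_eq, if_pos h, if_pos h]
  · rw [if_neg h, pvLoop_eq min [the_list] [] (by simpa using h)]
    simp
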